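-- pv_equiv track=rewrite | github.com/lurry2020/homecore | backend/app.py | parse_vms_esxi
-- ===== SOURCE A (Python) =====
-- from typing import Any
--
-- def parse_vms_esxi(raw: str) -> list[dict[str, Any]]:
--     """Parse `esxcli vm process list` output (key: value blocks per VM)."""
--     vms: list[dict[str, Any]] = []
--     current: dict[str, Any] = {}
--     for line in raw.splitlines():
--         line = line.strip()
--         if not line:
--             if current:
--                 vms.append(current)
--                 current = {}
--             continue
--         if ":" in line:
--             key, _, val = line.partition(":")
--             current[key.strip().lower().replace(" ", "_")] = val.strip()
--         elif not current:
--             # Some ESXi versions print the VM name as a bare header line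
--             current["display_name"] = line
--     if current:
--         vms.append(current)
--     return vms
-- ===== SOURCE B (Python) =====
-- from typing import Any
--
--
-- def _block_to_vm(block: list[str]) -> dict[str, Any]:
--     vm: dict[str, Any] = {}
--     for line in block:
--         if ":" in line:
--             key, _, val = line.partition(":")
--             vm[key.strip().lower().replace(" ", "_")] = val.strip()
--         elif not vm:
--             vm["display_name"] = line
--     return vm
--
--
-- def parse_vms_esxi(raw: str) -> list[dict[str, Any]]:
--     """Parse `esxcli vm process list` output (key: value blocks per VM)."""
--     blocks: list[list[str]] = []
--     cur: list[str] = []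
--     for line in raw.splitlines():
--         s = line.strip()
--         if s:
--             cur.append(s)
--         elif cur:
--             blocks.append(cur)
--             cur = []
--     if cur:
--         blocks.append(cur)
--     return [_block_to_vm(b) for b in blocks]
-- ===== Notes on version B (the rewrite author's own statement) =====
-- stated objective: simpler
-- what changed: B separates the work into two passes with different shapes: a grouping pass that collects stripped non-blank lines into blocks (blank lines close a block), and a mapping pass that turns each block into a field dict; A interleaves flushing and field extraction in one stateful loop.
import Mathlib
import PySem

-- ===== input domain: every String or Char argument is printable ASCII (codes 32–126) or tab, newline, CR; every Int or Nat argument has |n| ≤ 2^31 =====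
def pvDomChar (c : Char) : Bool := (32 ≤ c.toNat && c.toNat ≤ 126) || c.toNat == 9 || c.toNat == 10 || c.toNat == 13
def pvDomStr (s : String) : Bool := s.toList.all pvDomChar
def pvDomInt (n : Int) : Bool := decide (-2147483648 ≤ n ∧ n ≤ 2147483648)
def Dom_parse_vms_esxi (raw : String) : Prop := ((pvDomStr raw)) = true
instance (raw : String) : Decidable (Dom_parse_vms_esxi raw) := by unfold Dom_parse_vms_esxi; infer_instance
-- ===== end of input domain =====

-- B regroups A's single stateful loop into two passes (group blank-separated blocks, then map
-- each block to a field dict); objective: simpler/clearer decomposition, same O(n) cost.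

-- ===== PORT A =====

-- line.partition(":") for a line known to contain ':' (both Pythons only call it then):
-- exact: find gives the first index of ':', the two slices are the parts before/after it.
def pyPartitionColon (line : String) : String × String :=
  let i := PySem.Str.find line ":"
  (PySem.Str.slice line none (some i), PySem.Str.slice line (some (i + 1)) none)

def parse_vms_esxi_stepA (st : List (PySem.Dict String String) × PySem.Dict String String)
    (rawLine : String) : List (PySem.Dict String String) × PySem.Dict String String :=
  let line := PySem.Str.strip rawLine
  if line = "" then
    if st.2.items ≠ [] then (st.1 ++ [st.2], PySem.Dict.mk []) else st
  else if PySem.Str.isIn ":" line then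
    let kv := pyPartitionColon line
    (st.1, st.2.insert (PySem.Str.replace (PySem.Str.lower (PySem.Str.strip kv.1)) " " "_")
      (PySem.Str.strip kv.2))
  else if st.2.items = [] then
    (st.1, st.2.insert "display_name" line)
  else st

def parse_vms_esxi (raw : String) : List (List (String × String)) :=
  let st := (PySem.Str.splitlines raw).foldl parse_vms_esxi_stepA ([], PySem.Dict.mk [])
  let vms := if st.2.items ≠ [] then st.1 ++ [st.2] else st.1
  vms.map PySem.Dict.items

-- ===== PORT B =====

def pvBlockStep (d : PySem.Dict String String) (line : String) : PySem.Dict String String :=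
  if PySem.Str.isIn ":" line then
    let kv := pyPartitionColon line
    d.insert (PySem.Str.replace (PySem.Str.lower (PySem.Str.strip kv.1)) " " "_")
      (PySem.Str.strip kv.2)
  else if d.items = [] then d.insert "display_name" line
  else d

def pvBlockToVm (block : List String) : List (String × String) :=
  (block.foldl pvBlockStep (PySem.Dict.mk [])).items

def pvGroupStep (st : List (List String) × List String) (rawLine : String) :
    List (List String) × List String :=
  let s := PySem.Str.strip rawLine
  if s ≠ "" then (st.1, st.2 ++ [s])
  else if st.2 ≠ [] then (st.1 ++ [st.2], [])
  else st

def parse_vms_esxi_alt (raw : String) : List (List (String × String)) :=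
  let st := (PySem.Str.splitlines raw).foldl pvGroupStep ([], [])
  let blocks := if st.2 ≠ [] then st.1 ++ [st.2] else st.1
  blocks.map pvBlockToVm

-- ===== PRECONDITION & SPEC =====
def Spec_parse_vms_esxi (raw : String) (out : List (List (String × String))) : Prop := out = parse_vms_esxi_alt raw
instance (raw : String) (out : List (List (String × String))) : Decidable (Spec_parse_vms_esxi raw out) := by unfold Spec_parse_vms_esxi; infer_instance

-- ===== CLAIM (what is proved, stated in full; the proofs are below) =====
def Claim_equal_parse_vms_esxi : Prop := ∀ (raw : String), Dom_parse_vms_esxi raw → Spec_parse_vms_esxi raw (parse_vms_esxi raw)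

-- ===== LEMMAS AND PROOFS =====

def pvDictOf (cur : List String) : PySem.Dict String String :=
  cur.foldl pvBlockStep (PySem.Dict.mk [])

lemma insert_items_ne_nil (d : PySem.Dict String String) (k v : String) :
    (d.insert k v).items ≠ [] := by
  rw [PySem.Dict.items_insert]
  rcases d with ⟨l⟩
  cases l with
  | nil => simp [PySem.Dict.contains]
  | cons h t => split <;> simp

lemma pvBlockStep_items_ne_nil (d : PySem.Dict String String) (s : String) :
    (pvBlockStep d s).items ≠ [] := by
  unfold pvBlockStep
  split_ifs with h1 h2
  · exact insert_items_ne_nil _ _ _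
  · exact insert_items_ne_nil _ _ _
  · exact h2

lemma pvFoldl_items_ne_nil (l : List String) (d : PySem.Dict String String)
    (h : d.items ≠ []) : (l.foldl pvBlockStep d).items ≠ [] := by
  induction l generalizing d with
  | nil => exact h
  | cons c t ih => exact ih _ (pvBlockStep_items_ne_nil d c)

lemma pvDictOf_items_ne_nil (cur : List String) (h : cur ≠ []) :
    (pvDictOf cur).items ≠ [] := by
  cases cur with
  | nil => exact absurd rfl h
  | cons c t => exact pvFoldl_items_ne_nil t _ (pvBlockStep_items_ne_nil _ c)

-- On a non-blank line, A's step keeps the vms list and updates the dict exactly as B's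
-- per-block field step does on the stripped line.
lemma stepA_nonblank (v : List (PySem.Dict String String)) (d : PySem.Dict String String)
    (l : String) (hs : PySem.Str.strip l ≠ "") :
    parse_vms_esxi_stepA (v, d) l = (v, pvBlockStep d (PySem.Str.strip l)) := by
  unfold parse_vms_esxi_stepA pvBlockStep
  rw [if_neg hs]
  split_ifs <;> rfl

lemma pvDictOf_append (cur : List String) (s : String) :
    pvDictOf (cur ++ [s]) = pvBlockStep (pvDictOf cur) s := by
  unfold pvDictOf
  rw [List.foldl_append]
  rfl

-- A's running dict is pvDictOf of B's running block; one step preserves it.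
lemma fold_eq (lines : List String) (bs : List (List String)) (cur : List String) :
    lines.foldl parse_vms_esxi_stepA (bs.map pvDictOf, pvDictOf cur)
      = (let r := lines.foldl pvGroupStep (bs, cur); (r.1.map pvDictOf, pvDictOf r.2)) := by
  induction lines generalizing bs cur with
  | nil => rfl
  | cons l t ih =>
    simp only [List.foldl_cons]
    by_cases hs : PySem.Str.strip l = ""
    · by_cases hc : cur = []
      · subst hc
        have h1 : parse_vms_esxi_stepA (bs.map pvDictOf, pvDictOf []) l
            = (bs.map pvDictOf, pvDictOf []) := by
          unfold parse_vms_esxi_stepA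
          rw [if_pos hs]
          simp [pvDictOf]
        have h2 : pvGroupStep (bs, ([] : List String)) l = (bs, []) := by
          unfold pvGroupStep
          simp [hs]
        rw [h1, h2]
        exact ih bs []
      · have h1 : parse_vms_esxi_stepA (bs.map pvDictOf, pvDictOf cur) l
            = ((bs ++ [cur]).map pvDictOf, pvDictOf []) := by
          unfold parse_vms_esxi_stepA
          rw [if_pos hs, if_pos (pvDictOf_items_ne_nil cur hc)]
          simp [pvDictOf]
        have h2 : pvGroupStep (bs, cur) l = (bs ++ [cur], []) := by
          unfold pvGroupStep
          simp [hs, hc]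
        rw [h1, h2]
        exact ih (bs ++ [cur]) []
    · rw [stepA_nonblank _ _ _ hs, ← pvDictOf_append]
      have h2 : pvGroupStep (bs, cur) l = (bs, cur ++ [PySem.Str.strip l]) := by
        unfold pvGroupStep
        simp [hs]
      rw [h2]
      exact ih bs (cur ++ [PySem.Str.strip l])

-- ===== VERDICT (by name: the statement is the Claim_ definition above) =====
theorem parse_vms_esxi_spec : Claim_equal_parse_vms_esxi := by
  intro raw _
  unfold Spec_parse_vms_esxi parse_vms_esxi parse_vms_esxi_alt
  have h := fold_eq (PySem.Str.splitlines raw) [] []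
  simp only [List.map_nil] at h
  rw [show pvDictOf [] = PySem.Dict.mk [] from rfl] at h
  rw [h]
  set r := (PySem.Str.splitlines raw).foldl pvGroupStep ([], []) with hr
  dsimp only
  by_cases hc : r.2 = []
  · simp [hc, pvDictOf, pvBlockToVm]
  · rw [if_pos (pvDictOf_items_ne_nil r.2 hc), if_pos hc]
    simp [pvBlockToVm, pvDictOf]
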